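-- pv_equiv track=rewrite | github.com/Darkhouse13/publishing-service | app.py | _preferred_fallback_category
-- ===== SOURCE A (Python) =====
-- def _preferred_fallback_category(
--     category_names: list[str],
--     fallback_category: str = "",
--     deprioritized_category: str = "",
-- ) -> str:
--     if not category_names:
--         return ""
--     fallback_folded = fallback_category.casefold()
--     deprioritized_folded = deprioritized_category.casefold()
--     if fallback_folded:
--         for name in category_names:
--             if name.casefold() == fallback_folded:
--                 return name
--     for name in category_names:
--         if not deprioritized_folded or name.casefold() != deprioritized_folded:
--             return name
--     return category_names[0]
-- ===== SOURCE B (Python) =====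
-- def _preferred_fallback_category(
--     category_names: list[str],
--     fallback_category: str = "",
--     deprioritized_category: str = "",
-- ) -> str:
--     if not category_names:
--         return ""
--     ff = fallback_category.casefold()
--     df = deprioritized_category.casefold()
--     fb_hit = None
--     non_dep = None
--     for name in category_names:
--         folded = name.casefold()
--         if fb_hit is None and ff and folded == ff:
--             fb_hit = name
--         if non_dep is None and (not df or folded != df):
--             non_dep = name
--     if fb_hit is not None:
--         return fb_hit
--     if non_dep is not None:
--         return non_dep
--     return category_names[0]
-- ===== Notes on version B (the rewrite author's own statement) =====
-- stated objective: alternative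
-- what changed: Replaced A's two separate early-returning scans (one for the fallback match, one for the first non-deprioritized name) by a single pass that records the first fallback hit and the first non-deprioritized name into two variables, followed by a post-loop priority decision.
import Mathlib
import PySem

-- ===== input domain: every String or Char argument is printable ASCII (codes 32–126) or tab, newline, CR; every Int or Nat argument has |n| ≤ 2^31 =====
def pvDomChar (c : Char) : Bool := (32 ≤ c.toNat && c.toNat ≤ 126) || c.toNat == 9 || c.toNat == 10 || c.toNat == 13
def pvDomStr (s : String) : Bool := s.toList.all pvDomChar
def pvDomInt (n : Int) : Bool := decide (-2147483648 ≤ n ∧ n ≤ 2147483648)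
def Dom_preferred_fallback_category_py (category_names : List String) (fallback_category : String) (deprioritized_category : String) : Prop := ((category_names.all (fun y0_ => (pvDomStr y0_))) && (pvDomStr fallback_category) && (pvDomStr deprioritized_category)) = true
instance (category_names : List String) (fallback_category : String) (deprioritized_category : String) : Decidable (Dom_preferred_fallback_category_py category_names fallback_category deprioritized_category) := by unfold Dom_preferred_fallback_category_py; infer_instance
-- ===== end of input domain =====

-- B replaces A's two early-returning scans by a single pass filling two slots (first fallback hit, first non-deprioritized name) with a post-loop priority decision; same cost, different decomposition.
-- ===== PORT A =====
def preferred_fallback_category_py (category_names : List String) (fallback_category : String) (deprioritized_category : String) : String :=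
  if category_names.isEmpty then "" else
  let fallback_folded := PySem.Str.lower fallback_category   -- .casefold(): exact = lower on the ASCII domain
  let deprioritized_folded := PySem.Str.lower deprioritized_category
  match (if !(fallback_folded == "") then
           category_names.find? (fun name => PySem.Str.lower name == fallback_folded)
         else none) with
  | some name => name
  | none =>
    match category_names.find? (fun name =>
            (deprioritized_folded == "") || !(PySem.Str.lower name == deprioritized_folded)) with
    | some name => name
    | none => category_names.headD ""   -- category_names[0]; list is nonempty here


-- ===== PORT B =====
-- one loop step of B: fill each slot with the first element satisfying its predicate
def pvFillStep (p q : String → Bool) (acc : Option String × Option String) (n : String) :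
    Option String × Option String :=
  ((if acc.1.isNone && p n then some n else acc.1),
   (if acc.2.isNone && q n then some n else acc.2))

def preferred_fallback_category_py_alt (category_names : List String) (fallback_category : String) (deprioritized_category : String) : String :=
  if category_names.isEmpty then "" else
  let ff := PySem.Str.lower fallback_category
  let df := PySem.Str.lower deprioritized_category
  let r := category_names.foldl
    (pvFillStep (fun name => !(ff == "") && (PySem.Str.lower name == ff))
                (fun name => (df == "") || !(PySem.Str.lower name == df)))
    (none, none)
  match r.1 with
  | some name => name
  | none =>
    match r.2 with
    | some name => name
    | none => category_names.headD ""


-- ===== PRECONDITION & SPEC =====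
def Spec_preferred_fallback_category_py (category_names : List String) (fallback_category : String) (deprioritized_category : String) (out : String) : Prop := out = preferred_fallback_category_py_alt category_names fallback_category deprioritized_category
instance (category_names : List String) (fallback_category : String) (deprioritized_category : String) (out : String) : Decidable (Spec_preferred_fallback_category_py category_names fallback_category deprioritized_category out) := by unfold Spec_preferred_fallback_category_py; infer_instance

-- ===== CLAIM (what is proved, stated in full; the proofs are below) =====
def Claim_equal_preferred_fallback_category_py : Prop := ∀ (category_names : List String) (fallback_category : String) (deprioritized_category : String), Dom_preferred_fallback_category_py category_names fallback_category deprioritized_category → Spec_preferred_fallback_category_py category_names fallback_category deprioritized_category (preferred_fallback_category_py category_names fallback_category deprioritized_category)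

-- ===== LEMMAS AND PROOFS =====

lemma fill_fold (p q : String → Bool) (cs : List String) (a b : Option String) :
    cs.foldl (pvFillStep p q) (a, b) = (a.or (cs.find? p), b.or (cs.find? q)) := by
  induction cs generalizing a b with
  | nil => cases a <;> cases b <;> simp
  | cons x xs ih =>
    simp only [List.foldl_cons, pvFillStep, List.find?_cons]
    rw [ih]
    cases a <;> cases b <;> cases hp : p x <;> cases hq : q x <;> simp

-- ===== VERDICT (by name: the statement is the Claim_ definition above) =====
theorem preferred_fallback_category_py_spec : Claim_equal_preferred_fallback_category_py := by
  intro cs fb dep _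
  unfold Spec_preferred_fallback_category_py preferred_fallback_category_py preferred_fallback_category_py_alt
  by_cases h : cs.isEmpty
  · simp [h]
  · simp only [h]
    rw [fill_fold]
    by_cases hf : PySem.Str.lower fb = ""
    · have hn : cs.find? (fun _ : String => false) = none := by simp
      simp [hf, hn]
    · have hp : (fun name => !(PySem.Str.lower fb == "") && (PySem.Str.lower name == PySem.Str.lower fb))
          = (fun name => PySem.Str.lower name == PySem.Str.lower fb) := by
        funext n; simp [hf]
      simp [hf, hp]
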